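-- pv_equiv track=rewrite | github.com/DevilDublin/Dev-Projects | email-summariser-action-extractor/app.py | trim_to_first_clause
-- ===== SOURCE A (Python) =====
-- CLAUSE_BREAKERS = [
--     " and ", " because ", " which ", " that ", " as ", " so ",
--     " but ", " while ", " although ", " though ",
-- ]
--
-- def trim_to_first_clause(s: str) -> str:
--     lower = s.lower()
--     cut = len(s)
--     for br in CLAUSE_BREAKERS:
--         idx = lower.find(br)
--         if idx != -1 and idx < cut:
--             cut = idx
--     return s[:cut].strip(" ,;:-")
-- ===== SOURCE B (Python) =====
-- CLAUSE_BREAKERS = [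
--     " and ", " because ", " which ", " that ", " as ", " so ",
--     " but ", " while ", " although ", " though ",
-- ]
--
-- def trim_to_first_clause(s: str) -> str:
--     # Single left-to-right scan: the first position where ANY breaker starts
--     # equals the minimum over the ten per-breaker first occurrences.
--     lower = s.lower()
--     cut = len(s)
--     for i in range(len(lower)):
--         if any(lower.startswith(br, i) for br in CLAUSE_BREAKERS):
--             cut = i
--             break
--     return s[:cut].strip(" ,;:-")
-- ===== Notes on version B (the rewrite author's own statement) =====
-- stated objective: alternative
-- what changed: Replaces ten separate str.find passes whose minimum index is tracked by one left-to-right scan that stops at the first position where any breaker matches.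
import Mathlib
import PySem

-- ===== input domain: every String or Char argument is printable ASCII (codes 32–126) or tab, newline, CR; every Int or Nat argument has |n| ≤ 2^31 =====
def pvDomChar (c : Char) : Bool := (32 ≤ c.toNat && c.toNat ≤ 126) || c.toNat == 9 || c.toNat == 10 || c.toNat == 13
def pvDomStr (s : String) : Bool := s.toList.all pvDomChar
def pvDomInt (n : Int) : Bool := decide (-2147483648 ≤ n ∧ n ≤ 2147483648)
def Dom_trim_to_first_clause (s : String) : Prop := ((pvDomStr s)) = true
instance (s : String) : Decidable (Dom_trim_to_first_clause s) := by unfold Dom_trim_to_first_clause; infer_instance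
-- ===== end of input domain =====

-- B replaces A's ten separate find passes (minimum index kept) by one left-to-right scan
-- stopping at the first position where any breaker matches (alternative decomposition, same cost).

-- ===== PORT A =====
def clauseBreakers : List (List Char) :=
  [" and ".toList, " because ".toList, " which ".toList, " that ".toList, " as ".toList,
   " so ".toList, " but ".toList, " while ".toList, " although ".toList, " though ".toList]

def stepA (lower : List Char) (cut : Int) (br : List Char) : Int :=
  let idx := PySem.Chars.find lower br
  if idx ≠ -1 ∧ idx < cut then idx else cut

def trim_to_first_clause (s : String) : String :=
  let l := s.toList
  let lower := PySem.Chars.lower l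
  let cut : Int := l.length
  let cut := clauseBreakers.foldl (stepA lower) cut
  String.ofList (PySem.Chars.stripChars (PySem.Chars.slice l none (some cut)) " ,;:-".toList)

-- ===== PORT B =====
-- first index i with some breaker a prefix of lower.drop i; length of the list if none
def firstBreak : List Char → Nat
  | [] => 0
  | c :: rest =>
    if clauseBreakers.any (fun br => br.isPrefixOf (c :: rest)) then 0
    else firstBreak rest + 1

def trim_to_first_clause_alt (s : String) : String :=
  let l := s.toList
  let lower := PySem.Chars.lower l
  String.ofList (PySem.Chars.stripChars (l.take (firstBreak lower)) " ,;:-".toList)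

-- ===== PRECONDITION & SPEC =====
def Spec_trim_to_first_clause (s : String) (out : String) : Prop := out = trim_to_first_clause_alt s
instance (s : String) (out : String) : Decidable (Spec_trim_to_first_clause s out) := by unfold Spec_trim_to_first_clause; infer_instance

-- ===== CLAIM (what is proved, stated in full; the proofs are below) =====
def Claim_equal_trim_to_first_clause : Prop := ∀ (s : String), Dom_trim_to_first_clause s → Spec_trim_to_first_clause s (trim_to_first_clause s)

-- ===== LEMMAS AND PROOFS =====

-- the predicate both programs are searching for
def breakAt (L : List Char) (i : Nat) : Prop := ∃ br ∈ clauseBreakers, br <+: L.drop i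

-- A's fold: characterisation of the running minimum
theorem foldA_spec (L : List Char) (brs : List (List Char)) (cut : Int) (hc : 0 ≤ cut) :
    0 ≤ brs.foldl (stepA L) cut ∧ brs.foldl (stepA L) cut ≤ cut ∧
      (∀ br ∈ brs, PySem.Chars.find L br ≠ -1 → brs.foldl (stepA L) cut ≤ PySem.Chars.find L br) ∧
      (brs.foldl (stepA L) cut = cut ∨ ∃ br ∈ brs, PySem.Chars.find L br = brs.foldl (stepA L) cut) := by
  induction brs generalizing cut with
  | nil => simpa using hc
  | cons br rest ih =>
    simp only [List.foldl_cons]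
    have hstep : stepA L cut br =
        if PySem.Chars.find L br ≠ -1 ∧ PySem.Chars.find L br < cut
        then PySem.Chars.find L br else cut := rfl
    by_cases h : PySem.Chars.find L br ≠ -1 ∧ PySem.Chars.find L br < cut
    · rw [hstep, if_pos h]
      obtain ⟨h0, hle, hmin, hend⟩ := ih (PySem.Chars.find L br)
        (by have := PySem.Chars.neg_one_le_find L br; omega)
      refine ⟨h0, by omega, ?_, ?_⟩
      · intro b hb hbne
        rcases List.mem_cons.mp hb with hb | hb
        · subst hb; omega
        · exact hmin b hb hbne
      · rcases hend with he | ⟨b, hb2, hfb⟩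
        · exact Or.inr ⟨br, List.mem_cons_self, by omega⟩
        · exact Or.inr ⟨b, List.mem_cons_of_mem _ hb2, hfb⟩
    · rw [hstep, if_neg h]
      obtain ⟨h0, hle, hmin, hend⟩ := ih cut hc
      refine ⟨h0, hle, ?_, ?_⟩
      · intro b hb hbne
        rcases List.mem_cons.mp hb with hb | hb
        · subst hb
          have := PySem.Chars.neg_one_le_find L b
          omega
        · exact hmin b hb hbne
      · rcases hend with he | ⟨b, hb2, hfb⟩
        · exact Or.inl he
        · exact Or.inr ⟨b, List.mem_cons_of_mem _ hb2, hfb⟩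

-- B's scan: characterisation of the first matching position
theorem firstBreak_spec (L : List Char) :
    firstBreak L ≤ L.length ∧ (∀ i < firstBreak L, ¬ breakAt L i) ∧
      (firstBreak L = L.length ∨ breakAt L (firstBreak L)) := by
  induction L with
  | nil =>
    refine ⟨by simp [firstBreak], by simp [firstBreak], Or.inl rfl⟩
  | cons c rest ih =>
    by_cases h : clauseBreakers.any (fun br => br.isPrefixOf (c :: rest)) = true
    · have hfb0 : firstBreak (c :: rest) = 0 := by simp [firstBreak, h]
      refine ⟨by simp [hfb0], by simp [hfb0], Or.inr ?_⟩
      simp only [List.any_eq_true] at h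
      obtain ⟨br, hbr, hp⟩ := h
      exact ⟨br, hbr, by rw [hfb0]; simpa [← List.isPrefixOf_iff_prefix] using hp⟩
    · obtain ⟨ih1, ih2, ih3⟩ := ih
      have hfb : firstBreak (c :: rest) = firstBreak rest + 1 := by
        simp [firstBreak, h]
      refine ⟨by simp [hfb]; omega, ?_, ?_⟩
      · intro i hi hbk
        rw [hfb] at hi
        match i, hbk with
        | 0, ⟨br, hbr, hp⟩ =>
          apply h
          simp only [List.any_eq_true]
          exact ⟨br, hbr, by simpa [← List.isPrefixOf_iff_prefix] using hp⟩
        | i + 1, ⟨br, hbr, hp⟩ =>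
          exact ih2 i (by omega) ⟨br, hbr, by simpa using hp⟩
      · rcases ih3 with he | ⟨br, hbr, hp⟩
        · exact Or.inl (by simp [hfb, he])
        · exact Or.inr ⟨br, hbr, by simpa [hfb] using hp⟩

theorem find_le_of_prefix_drop (L br : List Char) (n : Nat) (hp : br <+: L.drop n) :
    PySem.Chars.find L br ≠ -1 ∧ PySem.Chars.find L br ≤ n := by
  have hin : br <:+: L := by
    rw [← PySem.Chars.isIn_iff_infix, ← PySem.Chars.exists_prefix_drop_iff_isIn]
    exact ⟨n, hp⟩
  have hne : PySem.Chars.find L br ≠ -1 := by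
    rw [Ne, PySem.Chars.find_eq_neg_one_iff]; exact fun h => h hin
  have h0 : 0 ≤ PySem.Chars.find L br := by
    have := PySem.Chars.neg_one_le_find L br; omega
  refine ⟨hne, ?_⟩
  by_contra hlt
  push_neg at hlt
  exact (PySem.Chars.find_spec h0).2 n (by omega) hp

-- the two cuts coincide
theorem cut_eq (L : List Char) (len : Nat) (hlen : L.length = len) :
    clauseBreakers.foldl (stepA L) (len : Int) = (firstBreak L : Int) := by
  obtain ⟨h0, hle, hmin, hend⟩ := foldA_spec L clauseBreakers (len : Int) (by positivity)
  obtain ⟨b1, b2, b3⟩ := firstBreak_spec L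
  set r := clauseBreakers.foldl (stepA L) (len : Int) with hr
  set n := firstBreak L with hn
  -- r ≤ n
  have hrn : r ≤ (n : Int) := by
    rcases b3 with he | ⟨br, hbr, hp⟩
    · omega
    · obtain ⟨hne, hfle⟩ := find_le_of_prefix_drop L br n hp
      exact le_trans (hmin br hbr hne) hfle
  -- n ≤ r
  have hnr : (n : Int) ≤ r := by
    rcases hend with he | ⟨br, hbr, hfr⟩
    · omega
    · by_contra hlt
      push_neg at hlt
      have h0r := h0
      have hfind0 : 0 ≤ PySem.Chars.find L br := by omega
      have hp := (PySem.Chars.find_spec hfind0).1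
      rw [hfr] at hp
      exact b2 r.toNat (by omega) ⟨br, hbr, hp⟩
  omega

theorem take_cut (L : List Char) (n : Nat) :
    PySem.Chars.slice L none (some (n : Int)) = L.take n := by
  simp [PySem.Chars.slice_eq_listSlice, PySem.List.slice_to_natCast]

-- ===== VERDICT (by name: the statement is the Claim_ definition above) =====
theorem trim_to_first_clause_spec : Claim_equal_trim_to_first_clause := by
  intro s _
  unfold Spec_trim_to_first_clause trim_to_first_clause trim_to_first_clause_alt
  simp only
  have hlen : (PySem.Chars.lower s.toList).length = s.toList.length := by
    simp [PySem.Chars.lower]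
  rw [cut_eq (PySem.Chars.lower s.toList) s.toList.length hlen, take_cut]
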